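-- pv_equiv track=rewrite | github.com/JackZuu/seasoning | backend/app/routers/shopping_router.py | _in_larder
-- ===== SOURCE A (Python) =====
-- def _in_larder(ingredient_item: str, larder_names: list[str]) -> bool:
--     """
--     Match ingredient against larder. Case-insensitive, word-boundary-aware.
--     'oregano' in larder matches 'oregano' or 'fresh oregano' or 'oregano leaves'.
--     """
--     ing = ingredient_item.lower().strip()
--     padded = f" {ing} "
--     for name in larder_names:
--         if not name:
--             continue
--         if name == ing:
--             return True
--         if f" {name} " in padded:
--             return True
--         if padded.startswith(f" {name} ") or padded.endswith(f" {name} "):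
--             return True
--     return False
-- ===== SOURCE B (Python) =====
-- def _in_larder(ingredient_item: str, larder_names: list[str]) -> bool:
--     # Precompute every space-delimited segment of the padded ingredient once,
--     # then answer each larder name with a set lookup instead of a substring scan.
--     padded = " " + ingredient_item.lower().strip() + " "
--     spaces = [i for i, c in enumerate(padded) if c == " "]
--     cands = {padded[i + 1:j] for i in spaces for j in spaces if i < j}
--     return any(name in cands for name in larder_names if name)
-- ===== Notes on version B (the rewrite author's own statement) =====
-- stated objective: faster
-- what changed: Instead of scanning the padded ingredient for each larder name (three substring/equality checks per name), B precomputes the set of all space-delimited segments of the padded ingredient once and answers every non-empty name with a single hash-set lookup.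
import Mathlib
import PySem

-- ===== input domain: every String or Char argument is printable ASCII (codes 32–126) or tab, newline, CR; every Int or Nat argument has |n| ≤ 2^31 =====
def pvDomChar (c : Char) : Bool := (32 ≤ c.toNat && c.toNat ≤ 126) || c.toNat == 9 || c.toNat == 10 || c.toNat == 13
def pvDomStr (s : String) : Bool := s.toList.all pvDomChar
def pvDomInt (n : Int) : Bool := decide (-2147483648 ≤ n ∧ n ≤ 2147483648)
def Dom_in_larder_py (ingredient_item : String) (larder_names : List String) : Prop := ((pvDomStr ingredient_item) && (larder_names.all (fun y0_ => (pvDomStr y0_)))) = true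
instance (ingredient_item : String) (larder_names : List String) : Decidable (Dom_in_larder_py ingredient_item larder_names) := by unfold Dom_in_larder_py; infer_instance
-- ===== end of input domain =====

-- B replaces A's per-name substring scans by one precomputed set of all space-delimited
-- segments of the padded ingredient, answered with one set lookup per name, removing the per-name substring scan (objective: faster).

-- ===== PORT A =====
-- the for-loop over larder_names, with its early returns
def inLarderLoopA (ing padded : List Char) : List String → Bool
  | [] => false
  | name :: rest =>
    let n := name.toList
    if n = [] then inLarderLoopA ing padded rest
    else if n = ing then true
    else if PySem.Chars.isIn (' ' :: n ++ [' ']) padded then true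
    else if PySem.Chars.startswith padded (' ' :: n ++ [' ']) || PySem.Chars.endswith padded (' ' :: n ++ [' ']) then true
    else inLarderLoopA ing padded rest

def in_larder_py (ingredient_item : String) (larder_names : List String) : Bool :=
  let ing : List Char := PySem.Chars.strip (PySem.Chars.lower ingredient_item.toList)
  let padded : List Char := ' ' :: ing ++ [' ']
  inLarderLoopA ing padded larder_names

-- ===== PORT B =====
-- the set comprehension {padded[i+1:j] for i in spaces for j in spaces if i < j}
def candsB (padded : List Char) (spaces : List Int) : PySem.Set (List Char) :=
  PySem.Set.ofList (spaces.flatMap (fun i =>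
    spaces.filterMap (fun j =>
      if i < j then some (PySem.List.slice padded (some (i + 1)) (some j)) else none)))

def in_larder_py_alt (ingredient_item : String) (larder_names : List String) : Bool :=
  let padded : List Char := ' ' :: PySem.Chars.strip (PySem.Chars.lower ingredient_item.toList) ++ [' ']
  let spaces : List Int := (PySem.List.enumerate padded).filterMap (fun p => if p.2 = ' ' then some p.1 else none)
  let cands : PySem.Set (List Char) := candsB padded spaces
  larder_names.any (fun name => decide (name.toList ≠ []) && PySem.Set.contains cands name.toList)

-- ===== PRECONDITION & SPEC =====
def Spec_in_larder_py (ingredient_item : String) (larder_names : List String) (out : Bool) : Prop := out = in_larder_py_alt ingredient_item larder_names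
instance (ingredient_item : String) (larder_names : List String) (out : Bool) : Decidable (Spec_in_larder_py ingredient_item larder_names out) := by unfold Spec_in_larder_py; infer_instance

-- ===== CLAIM (what is proved, stated in full; the proofs are below) =====
def Claim_equal_in_larder_py : Prop := ∀ (ingredient_item : String) (larder_names : List String), Dom_in_larder_py ingredient_item larder_names → Spec_in_larder_py ingredient_item larder_names (in_larder_py ingredient_item larder_names)

-- ===== LEMMAS AND PROOFS =====

-- the common per-name criterion: the name padded with one space on each side
def wrapSp (n : List Char) : List Char := ' ' :: n ++ [' ']

-- membership in B's spaces list: exactly the space positions of padded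
theorem mem_spacesB (padded : List Char) (i : Int) :
    i ∈ (PySem.List.enumerate padded).filterMap (fun p => if p.2 = ' ' then some p.1 else none) ↔
    ∃ (k : Nat) (h : k < padded.length), i = (k : Int) ∧ padded[k] = ' ' := by
  simp only [List.mem_filterMap]
  constructor
  · rintro ⟨p, hp, hf⟩
    rw [PySem.List.mem_enumerate_iff] at hp
    obtain ⟨k, hk, rfl⟩ := hp
    by_cases h2 : padded[k] = ' '
    · exact ⟨k, hk, by simp [h2] at hf; omega, h2⟩
    · simp [h2] at hf
  · rintro ⟨k, hk, rfl, hsp⟩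
    exact ⟨((k : Int), padded[k]), by rw [PySem.List.mem_enumerate_iff]; exact ⟨k, hk, by simp⟩, by simp [hsp]⟩

-- the segment of padded cut between two space positions, wrapped, is an infix of padded
theorem slice_between (padded : List Char) (a b : Nat) (hab : a < b) (hb : b < padded.length)
    (ha' : padded[a]'(by omega) = ' ') (hb' : padded[b] = ' ') :
    wrapSp (PySem.List.slice padded (some ((a : Int) + 1)) (some (b : Int))) <:+: padded := by
  have hcast : ((a : Int) + 1) = ((a + 1 : Nat) : Int) := by push_cast; ring
  rw [hcast, PySem.List.slice_natCast]
  have key : wrapSp (List.take (b - (a + 1)) (List.drop (a + 1) padded))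
      = List.take (b - a + 1) (List.drop a padded) := by
    have h1 : List.drop a padded = padded[a]'(by omega) :: List.drop (a + 1) padded :=
      List.drop_eq_getElem_cons (by omega)
    rw [h1, ha', List.take_succ_cons]
    have h2 : b - a = (b - a - 1) + 1 := by omega
    rw [wrapSp, h2, List.take_add_one]
    have h3 : (List.drop (a + 1) padded)[b - a - 1]? = some ' ' := by
      rw [List.getElem?_drop]
      have : a + 1 + (b - a - 1) = b := by omega
      rw [this, List.getElem?_eq_getElem hb, hb']
    rw [h3]
    simp
    omega
  rw [key]
  exact ((List.take_prefix _ _).isInfix).trans ((List.drop_suffix _ _).isInfix)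

-- membership in B's candidate set is exactly the wrapped-infix criterion
theorem mem_candsB (padded : List Char) (n : List Char) :
    n ∈ candsB padded ((PySem.List.enumerate padded).filterMap (fun p => if p.2 = ' ' then some p.1 else none)) ↔
    wrapSp n <:+: padded := by
  set S := (PySem.List.enumerate padded).filterMap (fun p => if p.2 = ' ' then some p.1 else none) with hS
  have hmemS : ∀ i : Int, i ∈ S ↔ ∃ (k : Nat) (h : k < padded.length), i = (k : Int) ∧ padded[k] = ' ' := by
    intro i; rw [hS, mem_spacesB]
  rw [candsB, PySem.Set.mem_ofList, List.mem_flatMap]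
  constructor
  · rintro ⟨i, hi, hx⟩
    rw [List.mem_filterMap] at hx
    obtain ⟨j, hj, hx⟩ := hx
    rw [hmemS] at hi hj
    obtain ⟨a, ha, rfl, hsa⟩ := hi
    obtain ⟨b, hb, rfl, hsb⟩ := hj
    by_cases hab : (a : Int) < (b : Int)
    · rw [if_pos hab] at hx
      obtain rfl : n = PySem.List.slice padded (some ((a:Int) + 1)) (some (b:Int)) :=
        (Option.some_injective _ hx).symm
      exact slice_between padded a b (by exact_mod_cast hab) hb hsa hsb
    · rw [if_neg hab] at hx; exact absurd hx (by simp)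
  · rintro ⟨u, v, h⟩
    have hlen : padded.length = u.length + n.length + 2 + v.length := by
      rw [← h, wrapSp]; simp; omega
    have hpa : padded = u ++ ' ' :: (n ++ ' ' :: v) := by rw [← h, wrapSp]; simp
    have hpb : padded = (u ++ ' ' :: n) ++ ' ' :: v := by rw [← h, wrapSp]; simp
    have ha : u.length < padded.length := by omega
    have hb : u.length + n.length + 1 < padded.length := by omega
    have hsa : padded[u.length]'ha = ' ' := by
      have h0 : padded[u.length]? = some ' ' := by
        rw [hpa, List.getElem?_append_right (by omega)]; simp
      rw [List.getElem?_eq_getElem ha] at h0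
      exact Option.some_injective _ h0
    have hsb : padded[u.length + n.length + 1]'hb = ' ' := by
      have hblen : (u ++ ' ' :: n).length = u.length + n.length + 1 := by simp; omega
      have h0 : padded[u.length + n.length + 1]? = some ' ' := by
        rw [hpb, List.getElem?_append_right (by omega)]; simp [hblen]
      rw [List.getElem?_eq_getElem hb] at h0
      exact Option.some_injective _ h0
    have hslice : PySem.List.slice padded (some ((u.length : Int) + 1)) (some ((u.length + n.length + 1 : Nat) : Int)) = n := by
      have hcast : ((u.length : Int) + 1) = ((u.length + 1 : Nat) : Int) := by push_cast; ring
      rw [hcast, PySem.List.slice_natCast]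
      have h2 : List.drop (u.length + 1) padded = n ++ ' ' :: v := by
        have h1 : padded = (u ++ [' ']) ++ (n ++ ' ' :: v) := by rw [← h, wrapSp]; simp
        rw [h1, List.drop_left' (by simp)]
      rw [h2]
      have h3 : u.length + n.length + 1 - (u.length + 1) = n.length := by omega
      rw [h3, List.take_left]
    refine ⟨(u.length : Int), (hmemS _).mpr ⟨u.length, ha, rfl, hsa⟩, ?_⟩
    rw [List.mem_filterMap]
    refine ⟨((u.length + n.length + 1 : Nat) : Int), (hmemS _).mpr ⟨u.length + n.length + 1, hb, rfl, hsb⟩, ?_⟩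
    rw [if_pos (by exact_mod_cast (by omega : u.length < u.length + n.length + 1)), hslice]

-- A's loop decides, name by name, the same wrapped-infix criterion (empty names skipped)
theorem inLarderLoopA_eq (ing : List Char) (names : List String) :
    inLarderLoopA ing (wrapSp ing) names =
      names.any (fun name => decide (name.toList ≠ []) && decide (wrapSp name.toList <:+: wrapSp ing)) := by
  induction names with
  | nil => rfl
  | cons name rest ih =>
    rw [List.any_cons, ← ih]
    show (if name.toList = [] then _ else _) = _
    by_cases h0 : name.toList = []
    · simp [h0]
    · rw [if_neg h0]
      by_cases h1 : name.toList = ing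
      · rw [if_pos h1]
        have : wrapSp name.toList <:+: wrapSp ing := h1 ▸ List.infix_refl _
        simp [h0, this]
      · rw [if_neg h1]
        by_cases h2 : PySem.Chars.isIn (' ' :: name.toList ++ [' ']) (wrapSp ing) = true
        · rw [if_pos h2]
          have := (PySem.Chars.isIn_iff_infix _ _).mp h2
          simp [h0, show wrapSp name.toList <:+: wrapSp ing from this]
        · rw [if_neg h2]
          have hninf : ¬ wrapSp name.toList <:+: wrapSp ing := by
            intro hc; exact h2 ((PySem.Chars.isIn_iff_infix _ _).mpr hc)
          have h3 : (PySem.Chars.startswith (wrapSp ing) (' ' :: name.toList ++ [' ']) ||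
                     PySem.Chars.endswith (wrapSp ing) (' ' :: name.toList ++ [' '])) = false := by
            rw [Bool.or_eq_false_iff]
            constructor
            · rw [Bool.eq_false_iff]
              intro hc
              exact hninf ((PySem.Chars.startswith_iff _ _).mp hc).isInfix
            · rw [Bool.eq_false_iff]
              intro hc
              exact hninf ((PySem.Chars.endswith_iff _ _).mp hc).isInfix
          rw [h3, if_neg (by simp)]
          simp [hninf]

-- B's per-name test equals the wrapped-infix decision
theorem containsB_eq (padded : List Char) (n : List Char) :
    PySem.Set.contains (candsB padded ((PySem.List.enumerate padded).filterMap (fun p => if p.2 = ' ' then some p.1 else none))) n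
      = decide (wrapSp n <:+: padded) := by
  by_cases hm : wrapSp n <:+: padded
  · rw [(PySem.Set.contains_iff _ _).mpr ((mem_candsB _ _).mpr hm)]
    simp [hm]
  · simp only [hm, decide_false]
    rw [Bool.eq_false_iff]
    intro hc
    exact hm ((mem_candsB _ _).mp ((PySem.Set.contains_iff _ _).mp hc))

-- ===== VERDICT (by name: the statement is the Claim_ definition above) =====
theorem in_larder_py_spec : Claim_equal_in_larder_py := by
  intro ingredient_item larder_names _
  unfold Spec_in_larder_py in_larder_py in_larder_py_alt
  set ing := PySem.Chars.strip (PySem.Chars.lower ingredient_item.toList) with hing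
  show inLarderLoopA ing (' ' :: ing ++ [' ']) larder_names = _
  rw [show (' ' :: ing ++ [' ']) = wrapSp ing from rfl, inLarderLoopA_eq]
  apply congrArg
  funext name
  rw [containsB_eq]
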